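-- pv_equiv track=rewrite | github.com/CentOS-PaaS-SIG/linchpin | linchpin/provision/filter_plugins/combine_hosts_names.py | combine_hosts_names
-- ===== SOURCE A (Python) =====
-- def merge_two_dicts(x, y):
--     z = x.copy()   # start with x's keys and values
--     z.update(y)    # modifies z with y's keys and values & returns None
--     return z
--
-- def combine_hosts_names(hosts, names):
--     result = []
--     min_hosts_names = min(len(hosts), len(names))
--     for i in range(min_hosts_names):
--         result.append(merge_two_dicts(hosts[i], names[i]))
--     if len(hosts) > min_hosts_names:
--         for i in range(min_hosts_names, len(hosts)):
--             result.append(hosts[i])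
--     if len(names) > min_hosts_names:
--         for i in range(min_hosts_names, len(names)):
--             result.append(names[i])
--     return result
-- ===== SOURCE B (Python) =====
-- def combine_hosts_names(hosts, names):
--     # Pad both lists to equal length with the merge identity {} and merge
--     # uniformly: {} is neutral for dict-merge, so tails pass through unchanged.
--     pad = max(len(hosts), len(names))
--     hs = hosts + [{}] * (pad - len(hosts))
--     ns = names + [{}] * (pad - len(names))
--     return [{**a, **b} for a, b in zip(hs, ns)]
-- ===== Notes on version B (the rewrite author's own statement) =====
-- stated objective: alternative
-- what changed: Instead of a min-length merge loop followed by two conditional tail-copy loops, B pads both lists to the common maximum length with {} (the identity element of dict merge) and applies one uniform merge over the zipped pairs, eliminating all length case analysis.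
import Mathlib
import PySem

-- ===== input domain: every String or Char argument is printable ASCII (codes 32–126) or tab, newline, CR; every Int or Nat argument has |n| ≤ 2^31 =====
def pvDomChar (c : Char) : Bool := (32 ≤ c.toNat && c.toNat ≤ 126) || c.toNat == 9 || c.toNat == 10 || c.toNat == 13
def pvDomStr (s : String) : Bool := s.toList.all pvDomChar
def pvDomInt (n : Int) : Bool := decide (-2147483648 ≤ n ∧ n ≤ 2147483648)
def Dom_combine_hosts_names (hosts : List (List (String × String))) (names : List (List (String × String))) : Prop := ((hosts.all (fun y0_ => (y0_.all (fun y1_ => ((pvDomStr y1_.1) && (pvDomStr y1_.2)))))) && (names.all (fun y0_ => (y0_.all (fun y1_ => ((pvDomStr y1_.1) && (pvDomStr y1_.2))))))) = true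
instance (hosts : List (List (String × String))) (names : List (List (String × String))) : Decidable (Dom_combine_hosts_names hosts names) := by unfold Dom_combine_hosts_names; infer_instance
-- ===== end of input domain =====

-- B pads both lists to the common maximum length with {} (the identity of dict merge) and applies one uniform merge pass, replacing A's min-length loop plus two conditional tail loops (alternative; same cost).


-- ===== PORT A =====
-- merge_two_dicts: z = x.copy(); z.update(y); return z  (dict as insertion-ordered assoc list)
def merge_two_dicts (x y : List (String × String)) : List (String × String) :=
  (y.foldl (fun z p => z.insert p.1 p.2) (PySem.Dict.ofList x)).items

def combine_hosts_names (hosts : List (List (String × String))) (names : List (List (String × String))) : List (List (String × String)) :=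
  let min_hosts_names : Int := min (hosts.length : Int) (names.length : Int)
  let result : List (List (String × String)) :=
    (PySem.List.pyRange 0 min_hosts_names 1).foldl
      (fun acc i => acc ++ [merge_two_dicts (PySem.List.pyGetD hosts i []) (PySem.List.pyGetD names i [])]) []
  let result :=
    if (hosts.length : Int) > min_hosts_names then
      (PySem.List.pyRange min_hosts_names (hosts.length : Int) 1).foldl
        (fun acc i => acc ++ [PySem.List.pyGetD hosts i []]) result
    else result
  let result :=
    if (names.length : Int) > min_hosts_names then
      (PySem.List.pyRange min_hosts_names (names.length : Int) 1).foldl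
        (fun acc i => acc ++ [PySem.List.pyGetD names i []]) result
    else result
  result

-- ===== PORT B =====
-- {**a, **b}: a dict built by unpacking a then b
def dict_unpack (a b : List (String × String)) : List (String × String) :=
  ((PySem.Dict.ofList a).update b).items

def combine_hosts_names_alt (hosts : List (List (String × String))) (names : List (List (String × String))) : List (List (String × String)) :=
  let pad := max hosts.length names.length
  let hs := hosts ++ List.replicate (pad - hosts.length) []
  let ns := names ++ List.replicate (pad - names.length) []
  (hs.zip ns).map (fun p => dict_unpack p.1 p.2)

-- ===== PRECONDITION & SPEC =====
-- Pre_ requires every inner assoc list to have pairwise-distinct keys: the Python arguments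
-- are lists of dicts, and a Python dict can never hold duplicate keys, so this excludes no
-- input the Python A accepts — only assoc lists that are not images of Python dicts, where
-- A's verbatim tail differs from B's deduplicating merge with {}.
def Pre_combine_hosts_names (hosts : List (List (String × String))) (names : List (List (String × String))) : Prop :=
  (∀ d ∈ hosts, (d.map Prod.fst).Nodup) ∧ (∀ d ∈ names, (d.map Prod.fst).Nodup)
instance (hosts : List (List (String × String))) (names : List (List (String × String))) : Decidable (Pre_combine_hosts_names hosts names) := by unfold Pre_combine_hosts_names; infer_instance
def pvWitness_combine_hosts_names : (List (List (String × String))) × (List (List (String × String))) :=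
  ([[("a", "1")]], [[("b", "2")], [("c", "3")]])

def Spec_combine_hosts_names (hosts : List (List (String × String))) (names : List (List (String × String))) (out : List (List (String × String))) : Prop := out = combine_hosts_names_alt hosts names
instance (hosts : List (List (String × String))) (names : List (List (String × String))) (out : List (List (String × String))) : Decidable (Spec_combine_hosts_names hosts names out) := by unfold Spec_combine_hosts_names; infer_instance

-- ===== CLAIM (what is proved, stated in full; the proofs are below) =====
def Claim_equal_combine_hosts_names : Prop := ∀ (hosts : List (List (String × String))) (names : List (List (String × String))), Dom_combine_hosts_names hosts names → Pre_combine_hosts_names hosts names → Spec_combine_hosts_names hosts names (combine_hosts_names hosts names)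

-- ===== LEMMAS AND PROOFS =====

-- a reference recursive form both ports are reduced to
def combZip (hs ns : List (List (String × String))) : List (List (String × String)) :=
  match hs, ns with
  | [], ns => ns
  | h :: hs, [] => h :: hs
  | h :: hs, n :: ns => merge_two_dicts h n :: combZip hs ns

theorem foldl_app_map {A B : Type} (l : List A) (f : A → B) (acc : List B) :
    l.foldl (fun a x => a ++ [f x]) acc = acc ++ l.map f := by
  induction l generalizing acc with
  | nil => simp
  | cons x xs ih => simp [List.foldl_cons, ih]

theorem range_foldl_map (n : Nat) (f : Int → List (String × String)) (acc : List (List (String × String))) :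
    (PySem.List.pyRange 0 (n : Int) 1).foldl (fun a i => a ++ [f i]) acc
      = acc ++ List.map (fun k : Nat => f (k : Int)) (List.range n) := by
  rw [foldl_app_map, PySem.List.pyRange_zero_natCast, List.map_map]
  rfl

theorem zip_map_merge (hs ns : List (List (String × String))) :
    List.map
      (fun k : Nat => merge_two_dicts (PySem.List.pyGetD hs (k : Int) []) (PySem.List.pyGetD ns (k : Int) []))
      (List.range (min hs.length ns.length))
      = List.zipWith merge_two_dicts hs ns := by
  induction hs generalizing ns with
  | nil => simp
  | cons h hs ih =>
    cases ns with
    | nil => simp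
    | cons n ns =>
      simp only [List.length_cons, Nat.succ_min_succ, List.range_succ_eq_map, List.map_cons,
        List.map_map, List.zipWith_cons_cons]
      rw [← ih ns]
      congr 1
      · simp [PySem.List.pyGetD_ofNat']
      · apply List.map_congr_left
        intro k _
        simp [PySem.List.pyGetD_natCast]

theorem combZip_eq (hs ns : List (List (String × String))) :
    combZip hs ns
      = List.zipWith merge_two_dicts hs ns
        ++ hs.drop (min hs.length ns.length) ++ ns.drop (min hs.length ns.length) := by
  induction hs generalizing ns with
  | nil => simp [combZip]
  | cons h hs ih =>
    cases ns with
    | nil => simp [combZip]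
    | cons n ns => simp [combZip, ih, Nat.succ_min_succ]

theorem tail_fold (xs : List (List (String × String))) (m : Nat) (acc : List (List (String × String))) :
    (PySem.List.pyRange (m : Int) (xs.length : Int) 1).foldl
      (fun a i => a ++ [PySem.List.pyGetD xs i []]) acc
      = acc ++ xs.drop m := by
  rw [foldl_app_map, PySem.List.map_pyGetD_pyRange' xs [] (by positivity)]
  simp

-- A reduces to the reference form
theorem a_eq_combZip (hosts names : List (List (String × String))) :
    combine_hosts_names hosts names = combZip hosts names := by
  unfold combine_hosts_names
  have hcast : min (hosts.length : Int) (names.length : Int)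
      = ((min hosts.length names.length : Nat) : Int) := by
    simp [Nat.cast_min]
  simp only [hcast, range_foldl_map, List.nil_append, zip_map_merge, tail_fold, combZip_eq]
  split_ifs with h1 h2 h2
  · exact (by omega : False).elim
  · rw [List.drop_eq_nil_of_le (show hosts.length ≤ min hosts.length names.length by omega)]
    simp
  · rw [List.drop_eq_nil_of_le (show names.length ≤ min hosts.length names.length by omega)]
    simp
  · rw [List.drop_eq_nil_of_le (show hosts.length ≤ min hosts.length names.length by omega),
        List.drop_eq_nil_of_le (show names.length ≤ min hosts.length names.length by omega)]
    simp

-- merging a nodup-keyed assoc list into the empty dict reproduces it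
theorem unpack_nil_left (y : List (String × String)) (h : (y.map Prod.fst).Nodup) :
    dict_unpack [] y = y := by
  unfold dict_unpack
  have := PySem.Dict.items_foldl_insert_fresh (l := y) (k := Prod.fst) (v := Prod.snd)
      (d := PySem.Dict.empty) (by simp) h
  simpa using this

theorem unpack_nil_right (x : List (String × String)) (h : (x.map Prod.fst).Nodup) :
    dict_unpack x [] = x := by
  have : dict_unpack x [] = dict_unpack [] x := rfl
  rw [this, unpack_nil_left x h]

theorem unpack_eq_merge (x y : List (String × String)) :
    dict_unpack x y = merge_two_dicts x y := rfl

-- B reduces to the reference form, given nodup keys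
theorem map_zip_rep_left (ns : List (List (String × String)))
    (h : ∀ d ∈ ns, (d.map Prod.fst).Nodup) :
    ((List.replicate ns.length ([] : List (String × String))).zip ns).map
      (fun p => dict_unpack p.1 p.2) = ns := by
  induction ns with
  | nil => simp
  | cons n ns ih =>
    simp only [List.length_cons, List.replicate_succ, List.zip_cons_cons, List.map_cons]
    rw [unpack_nil_left n (h n (by simp)), ih (fun d hd => h d (List.mem_cons_of_mem _ hd))]

theorem map_zip_rep_right (hs : List (List (String × String)))
    (h : ∀ d ∈ hs, (d.map Prod.fst).Nodup) :
    (hs.zip (List.replicate hs.length ([] : List (String × String)))).map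
      (fun p => dict_unpack p.1 p.2) = hs := by
  induction hs with
  | nil => simp
  | cons x xs ih =>
    simp only [List.length_cons, List.replicate_succ, List.zip_cons_cons, List.map_cons]
    rw [unpack_nil_right x (h x (by simp)), ih (fun d hd => h d (List.mem_cons_of_mem _ hd))]

theorem alt_cons_cons (h n : List (String × String)) (hs ns : List (List (String × String))) :
    combine_hosts_names_alt (h :: hs) (n :: ns)
      = dict_unpack h n :: combine_hosts_names_alt hs ns := by
  unfold combine_hosts_names_alt
  have hmax : max (hs.length + 1) (ns.length + 1) = max hs.length ns.length + 1 := by omega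
  simp only [List.length_cons, hmax, Nat.add_sub_add_right, List.cons_append,
    List.zip_cons_cons, List.map_cons]

-- B reduces to the reference form, given nodup keys
theorem b_eq_combZip (hosts names : List (List (String × String)))
    (hH : ∀ d ∈ hosts, (d.map Prod.fst).Nodup) (hN : ∀ d ∈ names, (d.map Prod.fst).Nodup) :
    combine_hosts_names_alt hosts names = combZip hosts names := by
  induction hosts generalizing names with
  | nil =>
    show combine_hosts_names_alt [] names = names
    unfold combine_hosts_names_alt
    simp only [List.length_nil, Nat.zero_max, Nat.sub_zero, Nat.sub_self,
      List.replicate_zero, List.append_nil, List.nil_append]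
    exact map_zip_rep_left names hN
  | cons h hs ih =>
    cases names with
    | nil =>
      show combine_hosts_names_alt (h :: hs) [] = h :: hs
      unfold combine_hosts_names_alt
      simp only [List.length_nil, Nat.max_zero, Nat.sub_zero, Nat.sub_self,
        List.replicate_zero, List.append_nil, List.nil_append]
      exact map_zip_rep_right (h :: hs) hH
    | cons n ns =>
      rw [alt_cons_cons, unpack_eq_merge,
        ih ns (fun d hd => hH d (List.mem_cons_of_mem _ hd))
          (fun d hd => hN d (List.mem_cons_of_mem _ hd))]
      rfl

-- ===== VERDICT (by name: the statement is the Claim_ definition above) =====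
theorem combine_hosts_names_spec : Claim_equal_combine_hosts_names := by
  intro hosts names _ hpre
  unfold Spec_combine_hosts_names
  rw [a_eq_combZip, b_eq_combZip hosts names hpre.1 hpre.2]
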